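-- pv_equiv track=rewrite | github.com/robertpzhang/sudoku_game | validation.py | row_valid
-- ===== SOURCE A (Python) =====
-- def row_valid(board):
--     """
--     row_valid checks every row in board to see if there is redundant element in the row
--     0 is not checked as the matrix is initialized with 0 elements
--
--     :param board: 2D matrix
--     :return: true or false if the rows are valid
--
--     """
--     row = len(board)
--     col = len(board[0])
--     for i in range(row):
--         hash_set = set()
--         for j in range(col):
--             if board[i][j] != 0 and board[i][j] in hash_set:
--                 return False
--             else:
--                 hash_set.add(board[i][j])
--         hash_set.clear()
--     return True
-- ===== SOURCE B (Python) =====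
-- def row_valid(board):
--     col = len(board[0])
--
--     def dup_free(r):
--         nz = sorted(r[j] for j in range(col) if r[j] != 0)
--         return all(x < y for x, y in zip(nz, nz[1:]))
--
--     return all(dup_free(r) for r in board)
-- ===== Notes on version B (the rewrite author's own statement) =====
-- stated objective: alternative
-- what changed: Detects duplicate nonzero entries per row by sorting the row's nonzero values and checking that consecutive sorted elements are strictly increasing, instead of A's incremental hash-set membership scan with early return.
-- outside the precondition, e.g. on row_valid([[1, 2, 3], [5, 5]]): A returns False, B raises IndexError; on row_valid([]): A raises IndexError, B raises IndexError
import Mathlib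
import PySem

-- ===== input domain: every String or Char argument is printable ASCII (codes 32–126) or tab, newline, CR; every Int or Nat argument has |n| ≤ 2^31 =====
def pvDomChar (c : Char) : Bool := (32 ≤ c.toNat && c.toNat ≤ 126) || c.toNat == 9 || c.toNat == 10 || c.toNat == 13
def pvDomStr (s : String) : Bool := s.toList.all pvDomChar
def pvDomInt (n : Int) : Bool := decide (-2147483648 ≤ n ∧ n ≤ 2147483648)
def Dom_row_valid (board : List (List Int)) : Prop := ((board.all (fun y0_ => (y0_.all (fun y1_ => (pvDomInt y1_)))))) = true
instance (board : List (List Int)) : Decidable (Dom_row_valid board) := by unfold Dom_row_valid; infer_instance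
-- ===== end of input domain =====

-- B detects per-row duplicates by sorting each row's nonzero values and requiring consecutive
-- sorted elements to be strictly increasing, instead of A's incremental set-membership scan:
-- an alternative algorithm of similar cost. Return-value equivalence only.


-- ===== PORT A =====
-- inner loop 'for j in range(col): …' with the early 'return False' and the growing hash_set
def pvRowScanA (r : List Int) : List Int → PySem.Set Int → Bool
  | [], _ => true
  | j :: js, s =>
      let v := PySem.List.pyGetD r j 0
      if v != 0 && PySem.Set.contains s v then false
      else pvRowScanA r js (PySem.Set.add s v)

-- outer loop 'for i in range(row): …'
def pvOuterA (board : List (List Int)) (col : Int) : List Int → Bool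
  | [] => true
  | i :: is =>
      if pvRowScanA (PySem.List.pyGetD board i []) (PySem.List.pyRange 0 col 1) PySem.Set.empty
      then pvOuterA board col is
      else false

def row_valid (board : List (List Int)) : Bool :=
  let row : Int := board.length
  let col : Int := (PySem.List.pyGetD board 0 []).length
  pvOuterA board col (PySem.List.pyRange 0 row 1)

-- ===== PORT B =====
-- 'r[j] for j in range(col) if r[j] != 0'
def pvNonzeros (r : List Int) (col : Int) : List Int :=
  (PySem.List.pyRange 0 col 1).filterMap (fun j =>
    if PySem.List.pyGetD r j 0 != 0 then some (PySem.List.pyGetD r j 0) else none)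

-- 'dup_free(r)': sort the nonzeros, then 'all(x < y for x, y in zip(nz, nz[1:]))'
def pvDupFree (col : Int) (r : List Int) : Bool :=
  let nz := PySem.List.sorted (pvNonzeros r col) (fun x => x) false
  (nz.zip (nz.drop 1)).all (fun p => decide (p.1 < p.2))

def row_valid_alt (board : List (List Int)) : Bool :=
  let col : Int := (PySem.List.pyGetD board 0 []).length
  board.all (pvDupFree col)

-- ===== PRECONDITION & SPEC =====
-- Pre_ excludes the empty board (len(board[0]) raises IndexError in both programs) and ragged
-- boards with a row shorter than the first row, on which both programs raise IndexError unless a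
-- duplicate found earlier triggers A's early return first (then A may return False where B raises).
def Pre_row_valid (board : List (List Int)) : Prop :=
  board ≠ [] ∧ ∀ r ∈ board, (board.headD []).length ≤ r.length
instance (board : List (List Int)) : Decidable (Pre_row_valid board) := by
  unfold Pre_row_valid; infer_instance
def pvWitness_row_valid : List (List Int) := [[1, 2], [2, 0]]

def Spec_row_valid (board : List (List Int)) (out : Bool) : Prop := out = row_valid_alt board
instance (board : List (List Int)) (out : Bool) : Decidable (Spec_row_valid board out) := by
  unfold Spec_row_valid; infer_instance

-- ===== CLAIM (what is proved, stated in full; the proofs are below) =====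
def Claim_equal_row_valid : Prop := ∀ (board : List (List Int)), Dom_row_valid board → Pre_row_valid board → Spec_row_valid board (row_valid board)

-- ===== LEMMAS AND PROOFS =====

-- the nonzero values A's inner scan meets, in order (identical to B's generator over the same js)
def pvNzOf (r : List Int) (js : List Int) : List Int :=
  js.filterMap (fun j =>
    if PySem.List.pyGetD r j 0 != 0 then some (PySem.List.pyGetD r j 0) else none)

lemma pvNzOf_nonzero (r : List Int) (js : List Int) : ∀ v ∈ pvNzOf r js, v ≠ 0 := by
  intro v hv
  simp only [pvNzOf, List.mem_filterMap] at hv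
  obtain ⟨j, _, hj⟩ := hv
  by_cases h : PySem.List.pyGetD r j 0 = 0 <;> simp [h] at hj
  exact fun hv0 => h (by rw [hj, hv0])

lemma pvScanA_true_iff (r : List Int) :
    ∀ (js : List Int) (s : PySem.Set Int),
      pvRowScanA r js s = true ↔ (pvNzOf r js).Nodup ∧ ∀ v ∈ pvNzOf r js, v ∉ s := by
  intro js
  induction js with
  | nil => intro s; simp [pvRowScanA, pvNzOf]
  | cons j js ih =>
      intro s
      by_cases h0 : PySem.List.pyGetD r j 0 = 0
      · have hnz : pvNzOf r (j :: js) = pvNzOf r js := by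
          simp [pvNzOf, h0]
        rw [hnz]
        have hstep : pvRowScanA r (j :: js) s
            = pvRowScanA r js (PySem.Set.add s (PySem.List.pyGetD r j 0)) := by
          simp [pvRowScanA, h0]
        rw [hstep, ih]
        constructor
        · rintro ⟨hnd, hmem⟩
          refine ⟨hnd, fun w hw hws => ?_⟩
          exact hmem w hw ((PySem.Set.mem_add _ _ _).2 (Or.inl hws))
        · rintro ⟨hnd, hmem⟩
          refine ⟨hnd, fun w hw hws => ?_⟩
          rcases (PySem.Set.mem_add _ _ _).1 hws with h | h
          · exact hmem w hw h
          · exact pvNzOf_nonzero r js w hw (h.trans h0)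
      · have hnz : pvNzOf r (j :: js) = PySem.List.pyGetD r j 0 :: pvNzOf r js := by
          simp [pvNzOf, h0]
        rw [hnz]
        by_cases hc : PySem.List.pyGetD r j 0 ∈ s
        · have hstep : pvRowScanA r (j :: js) s = false := by
            simp only [pvRowScanA]
            rw [if_pos]
            simp [h0, hc]
          rw [hstep]
          constructor
          · intro h; exact absurd h (by simp)
          · rintro ⟨_, hmem⟩
            exact absurd hc (hmem _ (by simp))
        · have hstep : pvRowScanA r (j :: js) s
              = pvRowScanA r js (PySem.Set.add s (PySem.List.pyGetD r j 0)) := by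
            simp only [pvRowScanA]
            rw [if_neg]
            simp [hc]
          rw [hstep, ih]
          simp only [List.nodup_cons, List.mem_cons]
          constructor
          · rintro ⟨hnd, hmem⟩
            refine ⟨⟨fun hin => hmem _ hin ((PySem.Set.mem_add _ _ _).2 (Or.inr rfl)), hnd⟩,
              fun w hw => ?_⟩
            rcases hw with h | h
            · exact h ▸ hc
            · exact fun hws => hmem w h ((PySem.Set.mem_add _ _ _).2 (Or.inl hws))
          · rintro ⟨⟨hvnin, hnd⟩, hmem⟩
            refine ⟨hnd, fun w hw hws => ?_⟩
            rcases (PySem.Set.mem_add _ _ _).1 hws with h | h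
            · exact hmem w (Or.inr hw) h
            · exact hvnin (h ▸ hw)

-- zip-with-tail adjacency test = IsChain (<)
lemma pvZipAll_iff_chain' (l : List Int) :
    ((l.zip (l.drop 1)).all (fun p => decide (p.1 < p.2))) = true ↔ l.IsChain (· < ·) := by
  induction l with
  | nil => simp
  | cons x t ih =>
      cases t with
      | nil => simp
      | cons y t' =>
          simp only [List.drop_one, List.tail_cons, List.zip_cons_cons, List.all_cons,
            Bool.and_eq_true, decide_eq_true_eq, List.isChain_cons_cons]
          simp only [List.drop_one, List.tail_cons] at ih
          exact and_congr Iff.rfl ih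

-- B's per-row adjacency test on the sorted nonzeros is true exactly when they are pairwise distinct
lemma pvSortedAdj_iff_nodup (nz : List Int) :
    (let s := PySem.List.sorted nz (fun x => x) false
     (s.zip (s.drop 1)).all (fun p => decide (p.1 < p.2))) = true ↔ nz.Nodup := by
  set s := PySem.List.sorted nz (fun x => x) false with hs
  have hperm : s.Perm nz := PySem.List.sorted_perm nz (fun x => x) false
  have hle : s.Pairwise (· ≤ ·) := by
    have := PySem.List.sorted_pairwise nz (fun x => x)
    simpa using this
  rw [pvZipAll_iff_chain', List.isChain_iff_pairwise]
  constructor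
  · intro hlt
    exact hperm.nodup_iff.mp (hlt.imp ne_of_lt)
  · intro hnd
    have hnds : s.Nodup := hperm.nodup_iff.mpr hnd
    exact (hle.and hnds).imp (fun h => lt_of_le_of_ne h.1 h.2)

lemma pvOuterA_eq_all (board : List (List Int)) (col : Int) :
    ∀ (is : List Int),
      pvOuterA board col is =
        is.all (fun i => pvRowScanA (PySem.List.pyGetD board i []) (PySem.List.pyRange 0 col 1) PySem.Set.empty) := by
  intro is
  induction is with
  | nil => rfl
  | cons i is ih =>
      simp only [pvOuterA, List.all_cons, ih]
      split <;> simp_all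

-- the two per-row checks agree (both read values through pyGetD with default 0)
lemma pvRow_eq (r : List Int) (col : Int) :
    pvRowScanA r (PySem.List.pyRange 0 col 1) PySem.Set.empty = pvDupFree col r := by
  have hnz : pvNonzeros r col = pvNzOf r (PySem.List.pyRange 0 col 1) := rfl
  rcases hb : pvDupFree col r with _ | _
  · rcases ha : pvRowScanA r (PySem.List.pyRange 0 col 1) PySem.Set.empty with _ | _
    · rfl
    · exfalso
      have hnd := ((pvScanA_true_iff r _ _).1 ha).1
      have : pvDupFree col r = true := by
        unfold pvDupFree
        rw [hnz]
        exact (pvSortedAdj_iff_nodup _).2 hnd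
      rw [hb] at this
      exact Bool.false_ne_true this
  · have hnd : (pvNzOf r (PySem.List.pyRange 0 col 1)).Nodup := by
      have := hb
      unfold pvDupFree at this
      rw [hnz] at this
      exact (pvSortedAdj_iff_nodup _).1 this
    exact (pvScanA_true_iff r _ _).2 ⟨hnd, fun v _ hv => by simp [PySem.Set.empty] at hv⟩

-- ===== VERDICT (by name: the statement is the Claim_ definition above) =====
theorem row_valid_spec : Claim_equal_row_valid := by
  intro board _ _
  unfold Spec_row_valid row_valid row_valid_alt
  rw [pvOuterA_eq_all]
  simp only [pvRow_eq]
  have := PySem.List.map_pyGetD_pyRange_zero' board ([] : List Int)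
  conv_rhs => rw [← this]
  rw [List.all_map, this]
  rfl
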